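-- pv_equiv track=rewrite | github.com/Zena0128/Algorithm | 프로그래머스/2/42626. 더 맵게/더 맵게.py | solution
-- ===== SOURCE A (Python) =====
-- import heapq
--
-- def mix(a, b):
--     return a + 2*b
--
-- def solution(scoville, K):
--     answer = 0
--     heapq.heapify(scoville)
--     if scoville[0] >= K:
--         return answer
--
--     while len(scoville) > 1:
--         heapq.heappush(scoville, mix(heapq.heappop(scoville), heapq.heappop(scoville)))
--         answer += 1
--         if scoville[0] >= K:
--             return answer
--
--     return -1
-- ===== SOURCE B (Python) =====
-- def solution(scoville, K):
--     # Two-queue monotone merge instead of a priority queue: sort once, then keep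
--     # the original values (q1) and the produced mixes (q2) as plain FIFO queues
--     # read through front indices i, j.  Each new mix dominates every mix still
--     # pending, so q2 stays in nondecreasing order by itself and the two current
--     # smallest values are always at the two queue fronts, found in O(1).
--     q1 = sorted(scoville)
--     q2 = []
--     i = j = 0
--
--     def current_min():
--         if j == len(q2):
--             return q1[i]
--         if i == len(q1):
--             return q2[j]
--         return q1[i] if q1[i] <= q2[j] else q2[j]
--
--     if current_min() >= K:
--         return 0
--     answer = 0
--     while (len(q1) - i) + (len(q2) - j) > 1:
--         pair = []
--         for _ in range(2):
--             if j == len(q2) or (i < len(q1) and q1[i] <= q2[j]):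
--                 pair.append(q1[i]); i += 1
--             else:
--                 pair.append(q2[j]); j += 1
--         q2.append(pair[0] + 2 * pair[1])
--         answer += 1
--         if current_min() >= K:
--             return answer
--     return -1
-- ===== Notes on version B (the rewrite author's own statement) =====
-- stated objective: alternative
-- what changed: Replaces the binary min-heap by the two-queue monotone-merge technique: after one initial sort no ordered structure is maintained at all - the original values and the produced mixes sit in two plain FIFO queues whose fronts always hold the two smallest values (each new mix provably dominates every pending mix), so every step is O(1) pointer moves instead of O(log n) heap sifts; A heapifies scoville in place while B leaves the argument untouched (return value only is claimed).
import Mathlib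
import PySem

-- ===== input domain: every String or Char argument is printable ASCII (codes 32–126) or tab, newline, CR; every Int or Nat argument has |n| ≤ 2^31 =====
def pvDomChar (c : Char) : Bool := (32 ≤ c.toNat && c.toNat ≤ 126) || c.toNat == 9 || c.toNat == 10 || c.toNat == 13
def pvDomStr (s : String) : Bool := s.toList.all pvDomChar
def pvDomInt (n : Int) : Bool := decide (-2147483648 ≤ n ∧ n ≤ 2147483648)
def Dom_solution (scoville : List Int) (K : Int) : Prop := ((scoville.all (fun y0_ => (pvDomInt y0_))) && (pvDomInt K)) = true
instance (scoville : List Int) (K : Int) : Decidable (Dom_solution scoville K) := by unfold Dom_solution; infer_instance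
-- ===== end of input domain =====

-- B replaces A's binary min-heap by the two-queue monotone-merge technique: one sort, then two
-- plain FIFO queues (original values / produced mixes) read at their fronts in O(1); return
-- value only is claimed (A heapifies scoville in place, B leaves the argument untouched).

-- ===== PORT A =====
-- The heapq calls are ported as an exact min-priority queue over the list of values:
-- heapq guarantees heap[0] is the minimum, heappop removes and returns it, heappush adds an
-- element; this is exact at the level of the returned answer for Int values.
def mixFn (a b : Int) : Int := a + 2 * b

-- heap[0] under the heapq invariant: the minimum of the values (dummy 0 on the empty list,
-- excluded by Pre_solution where Python raises IndexError).
def pqMin (h : List Int) : Int := (PySem.List.min? h (fun y => y)).getD 0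

theorem pqMin_mem (h : List Int) (hne : h ≠ []) : pqMin h ∈ h := by
  unfold pqMin
  cases hm : PySem.List.min? h (fun y => y) with
  | none => exact absurd ((PySem.List.min?_eq_none_iff h (fun y => y)).1 hm) hne
  | some m => simpa using PySem.List.min?_mem hm

theorem erase_min_len (h : List Int) (hne : h ≠ []) :
    (h.erase (pqMin h)).length = h.length - 1 :=
  List.length_erase_of_mem (pqMin_mem h hne)

-- while len(scoville) > 1: heappush(mix(heappop, heappop)); answer += 1; if heap[0] >= K: return answer
theorem solutionLoop_dec (h : List Int) (hl : 1 < h.length) :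
    ((h.erase (pqMin h)).erase (pqMin (h.erase (pqMin h)))
      ++ [mixFn (pqMin h) (pqMin (h.erase (pqMin h)))]).length < h.length := by
  have hne : h ≠ [] := by intro e; simp [e] at hl
  have h1ne : h.erase (pqMin h) ≠ [] := by
    have := erase_min_len h hne
    intro e; rw [e] at this; simp at this; omega
  have e1 := erase_min_len h hne
  have e2 := erase_min_len (h.erase (pqMin h)) h1ne
  simp only [List.length_append, List.length_cons, List.length_nil]
  omega

def solutionLoop (K : Int) (h : List Int) (answer : Int) : Int :=
  if hl : 1 < h.length then
    let a := pqMin h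
    let h1 := h.erase a
    let b := pqMin h1
    let h2 := h1.erase b
    let h3 := h2 ++ [mixFn a b]
    if pqMin h3 ≥ K then answer + 1
    else solutionLoop K h3 (answer + 1)
  else -1
termination_by h.length
decreasing_by exact solutionLoop_dec h hl

def solution (scoville : List Int) (K : Int) : Int :=
  let answer : Int := 0
  if pqMin scoville ≥ K then answer
  else solutionLoop K scoville answer

-- ===== PORT B =====
-- pop the overall smallest value from the front of one of the two queues
-- (Python: `if j == len(q2) or (i < len(q1) and q1[i] <= q2[j]): take q1[i] else take q2[j]`;
-- dummy (0, [], []) on two empty queues is unreachable under the loop guard / Pre_solution).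
def popMin (q1 q2 : List Int) : Int × List Int × List Int :=
  match q1, q2 with
  | [], [] => (0, [], [])
  | [], y :: ys => (y, [], ys)
  | x :: xs, [] => (x, xs, [])
  | x :: xs, y :: ys => if x ≤ y then (x, xs, y :: ys) else (y, x :: xs, ys)

-- current_min(): min of the two fronts (dummy 0 on two empty queues, unreachable likewise)
def cminB (q1 q2 : List Int) : Int :=
  match q1, q2 with
  | [], [] => 0
  | x :: _, [] => x
  | [], y :: _ => y
  | x :: _, y :: _ => if x ≤ y then x else y

theorem popMin_len (q1 q2 : List Int) (h : q1.length + q2.length ≠ 0) :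
    (popMin q1 q2).2.1.length + (popMin q1 q2).2.2.length + 1 = q1.length + q2.length := by
  cases q1 <;> cases q2 <;> simp [popMin] at h ⊢ <;> try omega
  split <;> simp <;> omega

theorem altLoop_dec (q1 q2 : List Int) (h : 1 < q1.length + q2.length) :
    (popMin (popMin q1 q2).2.1 (popMin q1 q2).2.2).2.1.length +
      ((popMin (popMin q1 q2).2.1 (popMin q1 q2).2.2).2.2
        ++ [(popMin q1 q2).1 + 2 * (popMin (popMin q1 q2).2.1 (popMin q1 q2).2.2).1]).length
      < q1.length + q2.length := by
  have h1 := popMin_len q1 q2 (by omega)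
  have h2 := popMin_len (popMin q1 q2).2.1 (popMin q1 q2).2.2 (by omega)
  simp only [List.length_append, List.length_cons, List.length_nil]
  omega

-- while (len(q1)-i) + (len(q2)-j) > 1: pop two smallest; append mix to q2; check front min
def altLoop (K : Int) (q1 q2 : List Int) (ans : Int) : Int :=
  if h : 1 < q1.length + q2.length then
    let p := popMin q1 q2
    let q := popMin p.2.1 p.2.2
    let q2' := q.2.2 ++ [p.1 + 2 * q.1]
    if cminB q.2.1 q2' ≥ K then ans + 1
    else altLoop K q.2.1 q2' (ans + 1)
  else -1
termination_by q1.length + q2.length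
decreasing_by exact altLoop_dec q1 q2 h

def solution_alt (scoville : List Int) (K : Int) : Int :=
  let q1 := PySem.List.sorted scoville (fun y => y) false
  if cminB q1 [] ≥ K then 0
  else altLoop K q1 [] 0

-- ===== PRECONDITION & SPEC =====
-- A evaluates scoville[0] on the empty list and raises IndexError there (B likewise raises on q1[i]).
def Pre_solution (scoville : List Int) (K : Int) : Prop := scoville ≠ []
instance (scoville : List Int) (K : Int) : Decidable (Pre_solution scoville K) := by unfold Pre_solution; infer_instance
def pvWitness_solution : List Int × Int := ([1, 2, 3, 9, 10, 12], 7)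

def Spec_solution (scoville : List Int) (K : Int) (out : Int) : Prop := out = solution_alt scoville K
instance (scoville : List Int) (K : Int) (out : Int) : Decidable (Spec_solution scoville K out) := by unfold Spec_solution; infer_instance

-- ===== CLAIM (what is proved, stated in full; the proofs are below) =====
def Claim_equal_solution : Prop := ∀ (scoville : List Int) (K : Int), Dom_solution scoville K → Pre_solution scoville K → Spec_solution scoville K (solution scoville K)

-- ===== LEMMAS AND PROOFS =====

-- the minimum is determined by membership + lower-boundedness
theorem pqMin_eq (h : List Int) (a : Int) (ha : a ∈ h) (hmin : ∀ x ∈ h, a ≤ x) :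
    pqMin h = a := by
  have hne : h ≠ [] := List.ne_nil_of_mem ha
  cases hm : PySem.List.min? h (fun y => y) with
  | none => exact absurd ((PySem.List.min?_eq_none_iff h (fun y => y)).1 hm) hne
  | some m =>
    have hmem : m ∈ h := PySem.List.min?_mem hm
    have hisMin := PySem.List.min?_isMin hm
    have h1 : m ≤ a := by simpa using hisMin a ha
    have h2 : a ≤ m := hmin m hmem
    simp [pqMin, hm, le_antisymm h1 h2]

-- one unfolded step of each loop
theorem solutionLoop_step (K : Int) (h : List Int) (ans a b : Int) (hl : 1 < h.length)
    (ha : pqMin h = a) (hb : pqMin (h.erase a) = b) :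
    solutionLoop K h ans =
      if pqMin ((h.erase a).erase b ++ [a + 2 * b]) ≥ K then ans + 1
      else solutionLoop K ((h.erase a).erase b ++ [a + 2 * b]) (ans + 1) := by
  rw [solutionLoop, dif_pos hl]
  simp only [ha, hb, mixFn]

theorem altLoop_step (K : Int) (q1 q2 : List Int) (ans : Int) (a : Int) (r1 r2 : List Int)
    (b : Int) (s1 s2 : List Int) (hl : 1 < q1.length + q2.length)
    (h1 : popMin q1 q2 = (a, r1, r2)) (h2 : popMin r1 r2 = (b, s1, s2)) :
    altLoop K q1 q2 ans =
      if cminB s1 (s2 ++ [a + 2 * b]) ≥ K then ans + 1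
      else altLoop K s1 (s2 ++ [a + 2 * b]) (ans + 1) := by
  rw [altLoop, dif_pos hl]
  simp only [h1, h2]

-- popMin pops the global minimum of two sorted queues, leaving suffixes of them
theorem popMin_spec (q1 q2 : List Int) (hs1 : q1.Pairwise (· ≤ ·)) (hs2 : q2.Pairwise (· ≤ ·))
    (hne : q1 ++ q2 ≠ []) (a : Int) (r1 r2 : List Int) (he : popMin q1 q2 = (a, r1, r2)) :
    (q1 ++ q2).Perm (a :: (r1 ++ r2)) ∧ (∀ x ∈ q1 ++ q2, a ≤ x) ∧ r1 <:+ q1 ∧ r2 <:+ q2 := by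
  match q1, q2, hs1, hs2 with
  | [], [], _, _ => simp at hne
  | [], y :: ys, _, hs2 =>
    simp only [popMin, Prod.mk.injEq] at he
    obtain ⟨rfl, rfl, rfl⟩ := he
    refine ⟨by simp, ?_, by simp, List.suffix_cons y ys⟩
    intro x hx
    simp only [List.nil_append] at hx
    rcases List.mem_cons.1 hx with rfl | hm
    · exact le_refl x
    · exact (List.pairwise_cons.1 hs2).1 x hm
  | x :: xs, [], hs1, _ =>
    simp only [popMin, Prod.mk.injEq] at he
    obtain ⟨rfl, rfl, rfl⟩ := he
    refine ⟨by simp, ?_, List.suffix_cons x xs, by simp⟩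
    intro z hz
    simp only [List.append_nil] at hz
    rcases List.mem_cons.1 hz with rfl | hm
    · exact le_refl z
    · exact (List.pairwise_cons.1 hs1).1 z hm
  | x :: xs, y :: ys, hs1, hs2 =>
    by_cases hxy : x ≤ y
    · simp only [popMin, if_pos hxy, Prod.mk.injEq] at he
      obtain ⟨rfl, rfl, rfl⟩ := he
      refine ⟨by simp, ?_, List.suffix_cons x xs, List.suffix_rfl⟩
      intro z hz
      rcases List.mem_append.1 hz with hz1 | hz2
      · rcases List.mem_cons.1 hz1 with rfl | hm
        · exact le_refl z
        · exact (List.pairwise_cons.1 hs1).1 z hm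
      · rcases List.mem_cons.1 hz2 with rfl | hm
        · exact hxy
        · exact le_trans hxy ((List.pairwise_cons.1 hs2).1 z hm)
    · simp only [popMin, if_neg hxy, Prod.mk.injEq] at he
      obtain ⟨rfl, rfl, rfl⟩ := he
      have hyx : y ≤ x := by omega
      refine ⟨List.perm_middle, ?_, List.suffix_rfl, List.suffix_cons y ys⟩
      intro z hz
      rcases List.mem_append.1 hz with hz1 | hz2
      · rcases List.mem_cons.1 hz1 with rfl | hm
        · exact hyx
        · exact le_trans hyx ((List.pairwise_cons.1 hs1).1 z hm)
      · rcases List.mem_cons.1 hz2 with rfl | hm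
        · exact le_refl z
        · exact (List.pairwise_cons.1 hs2).1 z hm

-- cminB is the global minimum of two sorted queues
theorem cminB_spec (q1 q2 : List Int) (hs1 : q1.Pairwise (· ≤ ·)) (hs2 : q2.Pairwise (· ≤ ·))
    (hne : q1 ++ q2 ≠ []) :
    cminB q1 q2 ∈ q1 ++ q2 ∧ ∀ x ∈ q1 ++ q2, cminB q1 q2 ≤ x := by
  match q1, q2, hs1, hs2 with
  | [], [], _, _ => simp at hne
  | [], y :: ys, _, hs2 =>
    refine ⟨by simp [cminB], ?_⟩
    intro x hx
    simp only [List.nil_append] at hx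
    rcases List.mem_cons.1 hx with rfl | hm
    · exact le_refl x
    · simpa [cminB] using (List.pairwise_cons.1 hs2).1 x hm
  | x :: xs, [], hs1, _ =>
    refine ⟨by simp [cminB], ?_⟩
    intro z hz
    simp only [List.append_nil] at hz
    rcases List.mem_cons.1 hz with rfl | hm
    · exact le_refl z
    · simpa [cminB] using (List.pairwise_cons.1 hs1).1 z hm
  | x :: xs, y :: ys, hs1, hs2 =>
    by_cases hxy : x ≤ y
    · refine ⟨by simp [cminB, hxy], ?_⟩
      intro z hz
      simp only [cminB, if_pos hxy]
      rcases List.mem_append.1 hz with hz1 | hz2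
      · rcases List.mem_cons.1 hz1 with rfl | hm
        · exact le_refl z
        · exact (List.pairwise_cons.1 hs1).1 z hm
      · rcases List.mem_cons.1 hz2 with rfl | hm
        · exact hxy
        · exact le_trans hxy ((List.pairwise_cons.1 hs2).1 z hm)
    · refine ⟨by simp [cminB, hxy], ?_⟩
      intro z hz
      simp only [cminB, if_neg hxy]
      rcases List.mem_append.1 hz with hz1 | hz2
      · rcases List.mem_cons.1 hz1 with rfl | hm
        · omega
        · have := (List.pairwise_cons.1 hs1).1 z hm; omega
      · rcases List.mem_cons.1 hz2 with rfl | hm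
        · exact le_refl z
        · exact (List.pairwise_cons.1 hs2).1 z hm

-- move the third element to the front
theorem perm_rot3 (a b y : Int) (t : List Int) : (a :: b :: y :: t).Perm (y :: a :: b :: t) := by
  calc (a :: b :: y :: t).Perm (a :: y :: b :: t) := List.Perm.cons a (List.Perm.swap y b t)
    _ |>.Perm (y :: a :: b :: t) := List.Perm.swap y a (b :: t)

-- the mix invariant: every pending mix y is at most u + 2v for any two other present values
def mixInv (q1 q2 : List Int) : Prop :=
  ∀ y ∈ q2, ∀ u v rest, (q1 ++ q2).Perm (y :: u :: v :: rest) → y ≤ u + 2 * v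

-- main loop equivalence: heap loop = two-queue loop under the invariant
theorem loop_eq (K : Int) : ∀ n, ∀ h q1 q2 : List Int, (q1 ++ q2).length = n →
    h.Perm (q1 ++ q2) → q1.Pairwise (· ≤ ·) → q2.Pairwise (· ≤ ·) → mixInv q1 q2 →
    ∀ ans : Int, solutionLoop K h ans = altLoop K q1 q2 ans := by
  intro n
  induction n using Nat.strong_induction_on with
  | _ n ih =>
    intro h q1 q2 hn hperm hs1 hs2 hinv ans
    simp only [List.length_append] at hn
    have hlen : h.length = q1.length + q2.length := by simpa using hperm.length_eq
    by_cases hgt : 1 < q1.length + q2.length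
    case neg =>
      rw [solutionLoop, altLoop, dif_neg (by omega : ¬ 1 < h.length), dif_neg hgt]
    case pos =>
    have hne1 : q1 ++ q2 ≠ [] := by
      intro e
      have h0 : (q1 ++ q2).length = 0 := by rw [e]; rfl
      simp only [List.length_append] at h0; omega
    rcases hpp1 : popMin q1 q2 with ⟨a, r1, r2⟩
    obtain ⟨perm1, min1, suf1a, suf1b⟩ := popMin_spec q1 q2 hs1 hs2 hne1 a r1 r2 hpp1
    have hs1r : r1.Pairwise (· ≤ ·) := hs1.sublist suf1a.sublist
    have hs2r : r2.Pairwise (· ≤ ·) := hs2.sublist suf1b.sublist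
    have l1 := perm1.length_eq
    simp only [List.length_append, List.length_cons] at l1
    have hne2 : r1 ++ r2 ≠ [] := by
      intro e
      have h0 : (r1 ++ r2).length = 0 := by rw [e]; rfl
      simp only [List.length_append] at h0; omega
    rcases hpp2 : popMin r1 r2 with ⟨b, s1, s2⟩
    obtain ⟨perm2, min2, suf2a, suf2b⟩ := popMin_spec r1 r2 hs1r hs2r hne2 b s1 s2 hpp2
    have hs1s : s1.Pairwise (· ≤ ·) := hs1r.sublist suf2a.sublist
    have hs2s : s2.Pairwise (· ≤ ·) := hs2r.sublist suf2b.sublist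
    have l2 := perm2.length_eq
    simp only [List.length_append, List.length_cons] at l2
    have hab : a ≤ b :=
      min1 b (perm1.symm.subset (List.mem_cons_of_mem a (perm2.symm.subset List.mem_cons_self)))
    -- A-side pops are the same values
    have hA1 : pqMin h = a :=
      pqMin_eq h a (hperm.symm.subset (perm1.symm.subset List.mem_cons_self))
        (fun x hx => min1 x (hperm.subset hx))
    have hErase1 : (h.erase a).Perm (r1 ++ r2) := by
      have t2 := perm1.erase a
      simp only [List.erase_cons_head] at t2
      exact (hperm.erase a).trans t2
    have hA2 : pqMin (h.erase a) = b :=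
      pqMin_eq _ b (hErase1.symm.subset (perm2.symm.subset List.mem_cons_self))
        (fun x hx => min2 x (hErase1.subset hx))
    have hErase2 : ((h.erase a).erase b).Perm (s1 ++ s2) := by
      have t2 := perm2.erase b
      simp only [List.erase_cons_head] at t2
      exact (hErase1.erase b).trans t2
    have hperm3 : ((h.erase a).erase b ++ [a + 2 * b]).Perm (s1 ++ (s2 ++ [a + 2 * b])) := by
      have := hErase2.append_right [a + 2 * b]
      simpa [List.append_assoc] using this
    -- survivors are at least b
    have hsurv : ∀ x ∈ s1 ++ s2, b ≤ x :=
      fun x hx => min2 x (perm2.symm.subset (List.mem_cons_of_mem b hx))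
    -- pending mixes are at most the new mix (old invariant at the popped pair)
    have hyM : ∀ y ∈ s2, y ≤ a + 2 * b := by
      intro y hy
      have hyq2 : y ∈ q2 := suf1b.sublist.subset (suf2b.sublist.subset hy)
      have hy12 : y ∈ s1 ++ s2 := List.mem_append_right s1 hy
      have e2 : (q1 ++ q2).Perm (a :: b :: (s1 ++ s2)) := perm1.trans (perm2.cons a)
      have e3 : (q1 ++ q2).Perm (a :: b :: y :: (s1 ++ s2).erase y) :=
        e2.trans (((List.perm_cons_erase hy12).cons b).cons a)
      exact hinv y hyq2 a b _ (e3.trans (perm_rot3 a b y _))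
    have hs2' : (s2 ++ [a + 2 * b]).Pairwise (· ≤ ·) := by
      rw [List.pairwise_append]
      refine ⟨hs2s, by simp, ?_⟩
      intro y hy z hz
      rcases List.mem_singleton.1 hz with rfl
      exact hyM y hy
    -- guard equality
    obtain ⟨cmem, cmin⟩ := cminB_spec s1 (s2 ++ [a + 2 * b]) hs1s hs2' (by simp)
    have hguard : pqMin ((h.erase a).erase b ++ [a + 2 * b]) = cminB s1 (s2 ++ [a + 2 * b]) :=
      pqMin_eq _ _ (hperm3.symm.subset cmem) (fun x hx => cmin x (hperm3.subset hx))
    -- new invariant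
    have hinv' : mixInv s1 (s2 ++ [a + 2 * b]) := by
      intro y hy u v rest hpm
      have hyle : y ≤ a + 2 * b := by
        rcases List.mem_append.1 hy with h' | h'
        · exact hyM y h'
        · rcases List.mem_singleton.1 h' with rfl; exact le_refl _
      by_cases hc : 0 ≤ a + b
      · have hball : ∀ x ∈ s1 ++ (s2 ++ [a + 2 * b]), b ≤ x := by
          intro x hx
          rcases List.mem_append.1 hx with hx1 | hx2
          · exact hsurv x (List.mem_append_left s2 hx1)
          · rcases List.mem_append.1 hx2 with hx3 | hx4
            · exact hsurv x (List.mem_append_right s1 hx3)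
            · rcases List.mem_singleton.1 hx4 with rfl; omega
        have hu := hball u (hpm.symm.subset (by simp))
        have hv := hball v (hpm.symm.subset (by simp))
        omega
      · cases s2 with
        | cons z zs =>
          exfalso
          have h1 := hyM z (by simp)
          have h2 := hsurv z (List.mem_append_right s1 (by simp))
          omega
        | nil =>
          have hy' : y = a + 2 * b := by simpa using hy
          subst hy'
          have hnotin : (a + 2 * b) ∉ s1 := by
            intro hmem
            have := hsurv _ (List.mem_append_left ([] : List Int) hmem)
            omega
          have h1 := hpm.erase (a + 2 * b)
          rw [List.nil_append] at h1
          rw [List.erase_append_right _ hnotin] at h1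
          simp only [List.erase_cons_head, List.append_nil] at h1
          have hu := hsurv u (List.mem_append_left ([] : List Int) (h1.symm.subset (by simp)))
          have hv := hsurv v (List.mem_append_left ([] : List Int) (h1.symm.subset (by simp)))
          omega
    -- step both loops and recurse
    rw [solutionLoop_step K h ans a b (by omega) hA1 hA2,
        altLoop_step K q1 q2 ans a r1 r2 b s1 s2 hgt hpp1 hpp2, hguard]
    by_cases hK : cminB s1 (s2 ++ [a + 2 * b]) ≥ K
    · rw [if_pos hK, if_pos hK]
    · rw [if_neg hK, if_neg hK]
      refine ih ((s1 ++ (s2 ++ [a + 2 * b])).length) ?_ _ _ _ rfl hperm3 hs1s hs2' hinv' (ans + 1)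
      simp only [List.length_append, List.length_cons, List.length_nil]
      omega

-- ===== VERDICT (by name: the statement is the Claim_ definition above) =====
theorem solution_spec : Claim_equal_solution := by
  intro scoville K _hdom hpre
  unfold Spec_solution solution solution_alt
  have hp : (PySem.List.sorted scoville (fun y => y) false).Perm scoville :=
    PySem.List.sorted_perm scoville (fun y => y) false
  have hs : (PySem.List.sorted scoville (fun y => y) false).Pairwise (· ≤ ·) := by
    simpa using PySem.List.sorted_pairwise (xs := scoville) (key := fun y => y)
  set q1 := PySem.List.sorted scoville (fun y => y) false with hq1
  have hne : q1 ++ [] ≠ [] := by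
    simp only [List.append_nil]
    intro e
    rw [e] at hp
    exact hpre hp.symm.eq_nil
  have hcm := cminB_spec q1 [] hs (by simp) hne
  have hpm : pqMin scoville = cminB q1 [] := by
    apply pqMin_eq
    · have := hcm.1; simp only [List.append_nil] at this; exact hp.subset this
    · intro x hx
      exact hcm.2 x (by simp only [List.append_nil]; exact hp.symm.subset hx)
  rw [hpm]
  by_cases hK : cminB q1 [] ≥ K
  · rw [if_pos hK, if_pos hK]
  · rw [if_neg hK, if_neg hK]
    exact loop_eq K (q1 ++ []).length scoville q1 [] rfl
      (by simpa using hp.symm) hs (by simp) (by intro y hy; simp at hy) 0
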